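-- pv_equiv track=rewrite | github.com/fflorey/advent_of_code_2023 | 3/1a.py | read_numbers
-- ===== SOURCE A (Python) =====
-- def read_numbers(line):
--     result = []
--     current_number = ""
--     for i, char in enumerate(line):
--         if char.isdigit():
--             current_number += char
--         elif current_number:
--             result.append((i - len(current_number), int(current_number)))
--             current_number = ""
--     if current_number:
--         result.append((len(line) - len(current_number), int(current_number) ))
--     return result
-- ===== SOURCE B (Python) =====
-- def read_numbers(line):
--     # Index-scan: find each maximal digit run with an inner loop, slice it out.
--     result = []
--     n = len(line)
--     i = 0
--     while i < n:
--         if line[i].isdigit():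
--             j = i + 1
--             while j < n and line[j].isdigit():
--                 j += 1
--             result.append((i, int(line[i:j])))
--             i = j
--         else:
--             i += 1
--     return result
-- ===== Notes on version B (the rewrite author's own statement) =====
-- stated objective: alternative
-- what changed: Replaces A's single pass that grows a current-number string character by character with an index scan that locates each maximal digit run via an inner loop and converts the run by one slice.
import Mathlib
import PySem

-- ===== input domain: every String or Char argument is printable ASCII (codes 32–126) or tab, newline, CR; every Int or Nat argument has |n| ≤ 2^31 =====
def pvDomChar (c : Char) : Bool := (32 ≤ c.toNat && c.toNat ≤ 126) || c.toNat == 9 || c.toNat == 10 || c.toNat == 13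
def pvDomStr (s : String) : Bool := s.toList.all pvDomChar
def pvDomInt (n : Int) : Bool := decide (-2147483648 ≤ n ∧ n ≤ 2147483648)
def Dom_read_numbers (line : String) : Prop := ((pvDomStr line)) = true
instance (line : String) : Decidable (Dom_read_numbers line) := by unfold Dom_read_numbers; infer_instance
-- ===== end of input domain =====

-- B replaces A's character-accumulator pass by an index scan over maximal digit runs; objective: alternative.

-- int(cs) for the digit runs both programs build; on those ofChars? always returns some, so getD 0 is exact
def pyInt (cs : List Char) : Int := (PySem.Int.ofChars? cs).getD 0

-- ===== PORT A =====
-- loop body of A's for-loop: state = (result, current_number)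
def stepA (st : List (Int × Int) × List Char) (p : Int × Char) : List (Int × Int) × List Char :=
  if PySem.Chars.isdigit p.2 then (st.1, st.2 ++ [p.2])
  else if st.2 ≠ [] then (st.1 ++ [(p.1 - (st.2.length : Int), pyInt st.2)], ([] : List Char))
  else st

def read_numbers (line : String) : List (Int × Int) :=
  let r := (PySem.List.enumerate line.toList 0).foldl stepA ([], [])
  if r.2 ≠ [] then r.1 ++ [((line.toList.length : Int) - (r.2.length : Int), pyInt r.2)] else r.1

-- ===== PORT B =====
-- inner while: first index ≥ j holding a non-digit
def runEnd (cs : List Char) (j : Nat) : Nat :=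
  if h : j < cs.length then (if PySem.Chars.isdigit cs[j] then runEnd cs (j + 1) else j) else j
termination_by cs.length - j

theorem runEnd_ge (cs : List Char) (j : Nat) : j ≤ runEnd cs j := by
  unfold runEnd
  split
  · split
    · have := runEnd_ge cs (j + 1); omega
    · exact le_refl j
  · exact le_refl j
termination_by cs.length - j

-- outer while over index i
def loopB (cs : List Char) (i : Nat) (acc : List (Int × Int)) : List (Int × Int) :=
  if h : i < cs.length then
    if PySem.Chars.isdigit cs[i] then
      let j := runEnd cs (i + 1)
      loopB cs j (acc ++ [((i : Int), pyInt (PySem.List.slice cs (some (i : Int)) (some (j : Int))))])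
    else loopB cs (i + 1) acc
  else acc
termination_by cs.length - i
decreasing_by
  · have := runEnd_ge cs (i + 1); omega
  · omega

def read_numbers_alt (line : String) : List (Int × Int) :=
  loopB line.toList 0 []

-- ===== PRECONDITION & SPEC =====
def Spec_read_numbers (line : String) (out : List (Int × Int)) : Prop := out = read_numbers_alt line
instance (line : String) (out : List (Int × Int)) : Decidable (Spec_read_numbers line out) := by unfold Spec_read_numbers; infer_instance

-- ===== CLAIM (what is proved, stated in full; the proofs are below) =====
def Claim_equal_read_numbers : Prop := ∀ (line : String), Dom_read_numbers line → Spec_read_numbers line (read_numbers line)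

-- ===== LEMMAS AND PROOFS =====

theorem runEnd_le (cs : List Char) (j : Nat) (hj : j ≤ cs.length) : runEnd cs j ≤ cs.length := by
  unfold runEnd
  split
  · split
    · exact runEnd_le cs (j + 1) (by omega)
    · exact hj
  · exact hj
termination_by cs.length - j


-- common recursive description of the remaining output, with pending digit run cur ending at position s
def pend (cs : List Char) (s : Int) (cur : List Char) : List (Int × Int) :=
  match cs with
  | [] => if cur ≠ [] then [(s - (cur.length : Int), pyInt cur)] else []
  | c :: t =>
    if PySem.Chars.isdigit c then pend t (s + 1) (cur ++ [c])
    else if cur ≠ [] then (s - (cur.length : Int), pyInt cur) :: pend t (s + 1) []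
    else pend t (s + 1) []

theorem foldA (cs : List Char) (s : Int) (res : List (Int × Int)) (cur : List Char) :
    (let r := (PySem.List.enumerate cs s).foldl stepA (res, cur);
     if r.2 ≠ [] then r.1 ++ [((s + (cs.length : Int)) - (r.2.length : Int), pyInt r.2)] else r.1)
    = res ++ pend cs s cur := by
  induction cs generalizing s res cur with
  | nil =>
    simp only [PySem.List.enumerate_nil, List.foldl_nil, pend, List.length_nil]
    split <;> simp_all
  | cons c t ih =>
    simp only [PySem.List.enumerate_cons, List.foldl_cons, pend, stepA]
    by_cases hd : PySem.Chars.isdigit c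
    · simpa [hd, List.length_cons, show s + (↑t.length + 1) = s + 1 + ↑t.length by ring]
        using ih (s + 1) res (cur ++ [c])
    · by_cases hc : cur = []
      · simpa [hd, hc, List.length_cons, show s + (↑t.length + 1) = s + 1 + ↑t.length by ring]
          using ih (s + 1) res []
      · simpa [hd, hc, List.length_cons, show s + (↑t.length + 1) = s + 1 + ↑t.length by ring]
          using ih (s + 1) (res ++ [(s - (cur.length : Int), pyInt cur)]) []

-- take / drop at the takeWhile boundary
theorem take_len_takeWhile (p : Char → Bool) (l : List Char) :
    l.take (l.takeWhile p).length = l.takeWhile p :=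
  (List.prefix_iff_eq_take.mp (List.takeWhile_prefix p)).symm

theorem drop_len_takeWhile (p : Char → Bool) (l : List Char) :
    l.drop (l.takeWhile p).length = l.dropWhile p := by
  set n := (l.takeWhile p).length with hn
  conv_lhs => rw [← List.takeWhile_append_dropWhile (p := p) (l := l)]
  rw [hn, List.drop_left]

theorem pend_flush (cs : List Char) (s : Int) (cur : List Char) (hc : cur ≠ []) :
    pend cs s cur =
      (s - (cur.length : Int), pyInt (cur ++ cs.takeWhile PySem.Chars.isdigit)) ::
        pend (cs.dropWhile PySem.Chars.isdigit) (s + ((cs.takeWhile PySem.Chars.isdigit).length : Int)) [] := by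
  induction cs generalizing s cur with
  | nil => simp [pend, hc]
  | cons c t ih =>
    by_cases hd : PySem.Chars.isdigit c
    · simp only [pend, hd, if_true, List.takeWhile_cons, List.dropWhile_cons]
      rw [ih (s + 1) (cur ++ [c]) (by simp)]
      simp only [List.length_append, List.length_cons, List.length_nil, List.append_assoc,
        List.singleton_append]
      congr 2 <;> (push_cast; ring)
    · simp [pend, hd, hc]

theorem runEnd_eq (cs : List Char) (j : Nat) (hj : j ≤ cs.length) :
    runEnd cs j = j + ((cs.drop j).takeWhile PySem.Chars.isdigit).length := by
  unfold runEnd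
  split
  · rename_i h
    split
    · rename_i hd
      rw [runEnd_eq cs (j + 1) (by omega), List.drop_eq_getElem_cons h, List.takeWhile_cons, hd]
      simp; omega
    · rename_i hd
      rw [List.drop_eq_getElem_cons h, List.takeWhile_cons]
      simp [hd]
  · rename_i h
    rw [List.drop_eq_nil_of_le (by omega)]
    simp
termination_by cs.length - j

theorem loopB_eq (cs : List Char) (i : Nat) (acc : List (Int × Int)) (hi : i ≤ cs.length) :
    loopB cs i acc = acc ++ pend (cs.drop i) (i : Int) [] := by
  unfold loopB
  split
  · rename_i h
    have hdropi : cs.drop i = cs[i] :: cs.drop (i + 1) := List.drop_eq_getElem_cons h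
    split
    · rename_i hd
      have hre := runEnd_eq cs (i + 1) (by omega)
      have hle := runEnd_le cs (i + 1) (by omega)
      have hge := runEnd_ge cs (i + 1)
      have hslice : PySem.List.slice cs (some (i : Int)) (some ((runEnd cs (i + 1) : Nat) : Int))
          = cs[i] :: (cs.drop (i + 1)).takeWhile PySem.Chars.isdigit := by
        rw [PySem.List.slice_natCast]
        have h1 : runEnd cs (i + 1) - i
            = ((cs.drop (i + 1)).takeWhile PySem.Chars.isdigit).length + 1 := by omega
        rw [hdropi, h1, List.take_succ_cons, take_len_takeWhile]
      have hdropj : cs.drop (runEnd cs (i + 1)) = (cs.drop (i + 1)).dropWhile PySem.Chars.isdigit := by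
        rw [hre, ← List.drop_drop, drop_len_takeWhile]
      rw [loopB_eq cs (runEnd cs (i + 1)) _ hle, hdropi, hslice, hdropj]
      simp only [pend, hd, if_true, List.nil_append]
      rw [pend_flush (cs.drop (i + 1)) ((i : Int) + 1) [cs[i]] (by simp)]
      simp only [List.append_assoc, List.singleton_append, List.length_cons, List.length_nil]
      congr 2
      · congr 1
        push_cast; ring
      · congr 1
        push_cast [hre]; ring
    · rename_i hd
      rw [loopB_eq cs (i + 1) acc (by omega), hdropi]
      simp only [pend, hd, if_false, Bool.false_eq_true, ne_eq, not_true_eq_false]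
      congr 2
  · rename_i h
    rw [List.drop_eq_nil_of_le (by omega)]
    simp [pend]
termination_by cs.length - i
decreasing_by
  all_goals (have := runEnd_ge cs (i + 1); omega)

-- ===== VERDICT (by name: the statement is the Claim_ definition above) =====
theorem read_numbers_spec : Claim_equal_read_numbers := by
  intro line _
  unfold Spec_read_numbers read_numbers read_numbers_alt
  rw [loopB_eq line.toList 0 [] (by omega)]
  have := foldA line.toList 0 [] []
  simp only [zero_add] at this
  simpa using this
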